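-- pv_equiv track=rewrite | github.com/tgstation/tgstation | tools/mapmerge2/dmm.py | num_to_key
-- ===== SOURCE A (Python) =====
-- BASE = 52
--
-- base52 = 'abcdefghijklmnopqrstuvwxyzABCDEFGHIJKLMNOPQRSTUVWXYZ'
--
-- def num_to_key(num, key_length):
--     if num >= BASE ** key_length:
--         raise KeyTooLarge(f"num={num} does not fit in key_length={key_length}")
--
--     result = ''
--     while num:
--         result = base52[num % BASE] + result
--         num //= BASE
--
--     assert len(result) <= key_length
--     return base52[0] * (key_length - len(result)) + result
--
-- class KeyTooLarge(Exception):
--     pass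
-- ===== SOURCE B (Python) =====
-- BASE = 52
-- base52 = 'abcdefghijklmnopqrstuvwxyzABCDEFGHIJKLMNOPQRSTUVWXYZ'
-- class KeyTooLarge(Exception):
--     pass
-- def _go(n, k):
--     if k == 0:
--         return ''
--     if k == 1:
--         return base52[n]
--     h = k // 2
--     hi, lo = divmod(n, BASE ** h)
--     return _go(hi, k - h) + _go(lo, h)
-- def num_to_key(num, key_length):
--     if num >= BASE ** key_length:
--         raise KeyTooLarge(f"num={num} does not fit in key_length={key_length}")
--     return _go(num, key_length)
-- ===== Notes on version B (the rewrite author's own statement) =====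
-- stated objective: alternative
-- what changed: Replaces the strip-least-significant-digit while loop with prepend and a separate 'a'-padding step by divide-and-conquer radix conversion: split the key in half with divmod(num, 52**(k//2)) and recurse on both halves, building the zero-padded key directly.
import Mathlib
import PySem

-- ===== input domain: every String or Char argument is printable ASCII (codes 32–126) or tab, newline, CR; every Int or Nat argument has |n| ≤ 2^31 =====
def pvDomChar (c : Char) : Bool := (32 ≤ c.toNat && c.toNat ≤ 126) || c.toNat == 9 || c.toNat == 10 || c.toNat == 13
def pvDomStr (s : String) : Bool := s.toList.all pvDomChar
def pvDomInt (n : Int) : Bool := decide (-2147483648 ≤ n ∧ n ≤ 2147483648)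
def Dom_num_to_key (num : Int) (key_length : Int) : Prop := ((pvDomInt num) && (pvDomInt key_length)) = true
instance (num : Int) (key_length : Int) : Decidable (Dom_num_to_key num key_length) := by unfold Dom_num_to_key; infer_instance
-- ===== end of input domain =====

-- B replaces A's strip-least-significant-digit while loop (prepend, then pad with 'a') by
-- divide-and-conquer radix conversion: split the key in half with divmod(num, 52**(k//2)) and
-- recurse on the two halves; no while loop and no padding step.
-- On inputs where Python A raises (num too large; negative key_length via the assert) or
-- diverges (negative num makes the while loop never end), nothing is claimed: Pre_ excludes them.

-- the module constant base52 (shared context of both versions)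
def base52L : List Char := "abcdefghijklmnopqrstuvwxyzABCDEFGHIJKLMNOPQRSTUVWXYZ".toList

-- ===== PORT A =====
-- Python's `while num:` loop; it only terminates for num ≥ 0 (Python diverges on negative
-- num, which Pre_ excludes), so the recursion is guarded by 0 < num.
def numToKeyLoop (num : Int) (result : List Char) : List Char :=
  if h : 0 < num then
    numToKeyLoop (PySem.Int.floordiv num 52)
      (PySem.List.pyGetD base52L (PySem.Int.mod num 52) 'a' :: result)
  else result
termination_by num.toNat
decreasing_by
  have h52 : PySem.Int.floordiv num 52 = num / 52 := PySem.Int.floordiv_eq_ediv_of_pos (by omega)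
  have : num / 52 < num := by omega
  have : 0 ≤ num / 52 := by positivity
  omega

-- For key_length < 0 Python compares num ≥ 52.0**key_length ∈ (0,1), which for an int num
-- is exactly num ≥ 1 = 52^key_length.toNat, so the guard below is faithful for every key_length.
def num_to_key (num : Int) (key_length : Int) : String :=
  if num ≥ 52 ^ key_length.toNat then ""  -- raise KeyTooLarge (excluded by Pre_)
  else
    let result := numToKeyLoop num []
    if (result.length : Int) ≤ key_length then
      String.ofList (List.replicate (key_length - (result.length : Int)).toNat 'a' ++ result)
    else ""  -- AssertionError (excluded by Pre_)

-- ===== PORT B =====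
-- B's recursive helper _go(n, k): split the key in half, divmod, recurse on both halves.
-- Python _go recurses forever for k < 0 (RecursionError, outside Pre_): that branch returns [].
def goB (n : Int) (k : Int) : List Char :=
  if hk0 : k = 0 then []
  else if hk1 : k = 1 then [PySem.List.pyGetD base52L n 'a']
  else if hkn : k < 0 then []  -- Python: RecursionError (outside Pre_)
  else
    goB (PySem.Int.floordiv n (52 ^ (PySem.Int.floordiv k 2).toNat))
        (k - PySem.Int.floordiv k 2) ++
    goB (PySem.Int.mod n (52 ^ (PySem.Int.floordiv k 2).toNat))
        (PySem.Int.floordiv k 2)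
termination_by k.toNat
decreasing_by
  all_goals
    have h2 : PySem.Int.floordiv k 2 = k / 2 := PySem.Int.floordiv_eq_ediv_of_pos (by omega)
    rw [h2]
    omega

def num_to_key_alt (num : Int) (key_length : Int) : String :=
  if num ≥ 52 ^ key_length.toNat then ""  -- raise KeyTooLarge (excluded by Pre_)
  else String.ofList (goB num key_length)

-- ===== PRECONDITION & SPEC =====
-- Exactly the inputs on which Python A returns normally: it raises KeyTooLarge for
-- num ≥ 52^key_length, diverges for num < 0, and fails its assert for key_length < 0.
def Pre_num_to_key (num : Int) (key_length : Int) : Prop :=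
  0 ≤ num ∧ 0 ≤ key_length ∧ num < 52 ^ key_length.toNat
instance (num : Int) (key_length : Int) : Decidable (Pre_num_to_key num key_length) := by
  unfold Pre_num_to_key; infer_instance

def pvWitness_num_to_key : Int × Int := (5, 3)

def Spec_num_to_key (num : Int) (key_length : Int) (out : String) : Prop :=
  out = num_to_key_alt num key_length
instance (num : Int) (key_length : Int) (out : String) : Decidable (Spec_num_to_key num key_length out) := by
  unfold Spec_num_to_key; infer_instance

-- ===== CLAIM =====
def Claim_equal_num_to_key : Prop := ∀ (num : Int) (key_length : Int), Dom_num_to_key num key_length → Pre_num_to_key num key_length → Spec_num_to_key num key_length (num_to_key num key_length)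

-- ===== LEMMAS AND PROOFS =====

theorem numToKeyLoop_stop {num : Int} (h : ¬ 0 < num) (res : List Char) :
    numToKeyLoop num res = res := by
  rw [numToKeyLoop]; simp [h]

theorem numToKeyLoop_step {num : Int} (h : 0 < num) (res : List Char) :
    numToKeyLoop num res =
      numToKeyLoop (PySem.Int.floordiv num 52)
        (PySem.List.pyGetD base52L (PySem.Int.mod num 52) 'a' :: res) := by
  rw [numToKeyLoop]; simp [h]

theorem numToKeyLoop_append_aux : ∀ (k : Nat) (num : Int), num.toNat ≤ k → ∀ (res : List Char),
    numToKeyLoop num res = numToKeyLoop num [] ++ res := by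
  intro k
  induction k with
  | zero =>
    intro num h res
    have h0 : ¬ 0 < num := by omega
    rw [numToKeyLoop_stop h0, numToKeyLoop_stop h0]
    simp
  | succ k ih =>
    intro num h res
    by_cases h0 : 0 < num
    · have hq : PySem.Int.floordiv num 52 = num / 52 :=
        PySem.Int.floordiv_eq_ediv_of_pos (by omega)
      have hq1 : (PySem.Int.floordiv num 52).toNat ≤ k := by
        rw [hq]
        have h1 : num / 52 < num := by omega
        have h2 : 0 ≤ num / 52 := by positivity
        omega
      rw [numToKeyLoop_step h0, numToKeyLoop_step h0 ([]),
        ih _ hq1, ih _ hq1 [PySem.List.pyGetD base52L (PySem.Int.mod num 52) 'a']]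
      simp
    · rw [numToKeyLoop_stop h0, numToKeyLoop_stop h0]
      simp

theorem numToKeyLoop_append (num : Int) (res : List Char) :
    numToKeyLoop num res = numToKeyLoop num [] ++ res :=
  numToKeyLoop_append_aux num.toNat num le_rfl res

theorem floordiv52_nonneg {num : Int} (h : 0 ≤ num) : 0 ≤ PySem.Int.floordiv num 52 := by
  rw [PySem.Int.floordiv_eq_ediv_of_pos (by omega)]
  positivity

theorem numToKeyLoop_len_le (L : Nat) : ∀ num : Int, 0 ≤ num → num < 52 ^ L →
    (numToKeyLoop num []).length ≤ L := by
  induction L with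
  | zero =>
    intro num h0 hn
    have h : ¬ 0 < num := by omega
    rw [numToKeyLoop_stop h]
    simp
  | succ L ih =>
    intro num h0 hn
    by_cases h : 0 < num
    · rw [numToKeyLoop_step h, numToKeyLoop_append]
      have hq0 : 0 ≤ PySem.Int.floordiv num 52 := floordiv52_nonneg h0
      have hqlt : PySem.Int.floordiv num 52 < 52 ^ L := by
        rw [PySem.Int.floordiv_eq_ediv_of_pos (by omega)]
        have hpow : (52:Int) ^ (L + 1) = 52 ^ L * 52 := by ring
        omega
      have := ih _ hq0 hqlt
      simp only [List.length_append, List.length_cons, List.length_nil]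
      omega
    · rw [numToKeyLoop_stop h]
      simp

-- A's padded result as a list: leading 'a's then the stripped digit list
def padKey (L : Nat) (num : Int) : List Char :=
  List.replicate (L - (numToKeyLoop num []).length) 'a' ++ numToKeyLoop num []

-- characterisation: the padded key's i-th character is the direct power-extracted digit
theorem padKey_eq_map (L : Nat) : ∀ num : Int, 0 ≤ num → num < 52 ^ L →
    padKey L num = (List.range L).map
      (fun i => PySem.List.pyGetD base52L ((num / 52 ^ (L - 1 - i)) % 52) 'a') := by
  induction L with
  | zero =>
    intro num h0 hn
    have h : ¬ 0 < num := by omega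
    unfold padKey
    rw [numToKeyLoop_stop h]
    simp
  | succ L ih =>
    intro num h0 hn
    have hq0 : 0 ≤ num / 52 := by positivity
    have hqlt : num / 52 < 52 ^ L := by
      have hpow : (52:Int) ^ (L + 1) = 52 ^ L * 52 := by ring
      omega
    -- RHS splits: positions 0..L-1 are the digits of num/52, position L is num % 52
    have hsplit : (List.range (L+1)).map
        (fun i => PySem.List.pyGetD base52L ((num / 52 ^ (L + 1 - 1 - i)) % 52) 'a')
        = (List.range L).map
            (fun i => PySem.List.pyGetD base52L ((num / 52 / 52 ^ (L - 1 - i)) % 52) 'a')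
          ++ [PySem.List.pyGetD base52L (num % 52) 'a'] := by
      rw [List.range_succ, List.map_append]
      congr 1
      · apply List.map_congr_left
        intro i hi
        have hiL : i < L := List.mem_range.mp hi
        have he : L + 1 - 1 - i = (L - 1 - i) + 1 := by omega
        rw [he, pow_succ]
        congr 2
        rw [mul_comm, ← Int.ediv_ediv_of_nonneg (by norm_num : (0:Int) ≤ 52)]
      · simp
    rw [hsplit, ← ih (num / 52) hq0 hqlt]
    -- LHS splits the same way
    by_cases h : 0 < num
    · have hqf : PySem.Int.floordiv num 52 = num / 52 :=
        PySem.Int.floordiv_eq_ediv_of_pos (by omega)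
      have hmf : PySem.Int.mod num 52 = num % 52 :=
        PySem.Int.mod_eq_emod_of_pos (by omega)
      unfold padKey
      rw [numToKeyLoop_step h, numToKeyLoop_append, hqf, hmf]
      have hlen := numToKeyLoop_len_le L (num / 52) hq0 hqlt
      simp only [List.length_append, List.length_cons, List.length_nil]
      have hrep : L + 1 - ((numToKeyLoop (num / 52) []).length + (0 + 1))
          = L - (numToKeyLoop (num / 52) []).length := by omega
      rw [hrep]
      simp [List.append_assoc]
    · have hnum0 : num = 0 := by omega
      subst hnum0
      unfold padKey
      rw [numToKeyLoop_stop (by omega)]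
      have : PySem.List.pyGetD base52L ((0:Int) % 52) 'a' = 'a' := by decide
      rw [this]
      rw [numToKeyLoop_stop (by omega)]
      simp [List.replicate_succ']

-- position L1+j of the length-(L1+L2) key only sees n mod 52^L2
theorem digit_emod (n : Int) (L2 j : Nat) (hj : j < L2) :
    (n % 52 ^ L2) / 52 ^ (L2 - 1 - j) % 52 = n / 52 ^ (L2 - 1 - j) % 52 := by
  have hL2 : L2 = (L2 - 1 - j) + (j + 1) := by omega
  set e := L2 - 1 - j with he
  set q := n / 52 ^ L2 with hq
  set r := n % 52 ^ L2 with hr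
  have hn : n = r + 52 ^ e * (52 ^ (j + 1) * q) := by
    have h1 : (52:Int) ^ L2 = 52 ^ e * 52 ^ (j + 1) := by rw [← pow_add, ← hL2]
    have h2 := Int.emod_add_ediv n (52 ^ L2)
    rw [← mul_assoc, ← h1]
    linarith [h2]
  have hne : (52:Int) ^ e ≠ 0 := by positivity
  calc r / 52 ^ e % 52
      = (r / 52 ^ e + 52 * (52 ^ j * q)) % 52 := (Int.add_mul_emod_self_left ..).symm
    _ = n / 52 ^ e % 52 := by
        congr 1
        rw [hn, Int.add_mul_ediv_left r _ hne]
        ring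

-- the padded key of a concatenated value splits at any position
theorem padKey_split (L1 L2 : Nat) (n : Int) (h0 : 0 ≤ n) (hn : n < 52 ^ (L1 + L2)) :
    padKey (L1 + L2) n = padKey L1 (n / 52 ^ L2) ++ padKey L2 (n % 52 ^ L2) := by
  have hp2 : (0:Int) < 52 ^ L2 := by positivity
  have hq0 : 0 ≤ n / 52 ^ L2 := by positivity
  have hqlt : n / 52 ^ L2 < 52 ^ L1 := by
    rw [Int.ediv_lt_iff_lt_mul hp2]
    calc n < 52 ^ (L1 + L2) := hn
      _ = 52 ^ L1 * 52 ^ L2 := pow_add 52 L1 L2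
  have hr0 : 0 ≤ n % 52 ^ L2 := Int.emod_nonneg n (by positivity)
  have hrlt : n % 52 ^ L2 < 52 ^ L2 := Int.emod_lt_of_pos n hp2
  rw [padKey_eq_map (L1 + L2) n h0 hn, padKey_eq_map L1 _ hq0 hqlt,
    padKey_eq_map L2 _ hr0 hrlt, List.range_add, List.map_append, List.map_map]
  congr 1
  · apply List.map_congr_left
    intro i hi
    have hiL : i < L1 := List.mem_range.mp hi
    have he : L1 + L2 - 1 - i = (L1 - 1 - i) + L2 := by omega
    rw [he]
    congr 2
    rw [pow_add, mul_comm ((52:Int) ^ (L1 - 1 - i)) _, ← Int.ediv_ediv_of_nonneg (by positivity)]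
  · apply List.map_congr_left
    intro j hj
    have hjL : j < L2 := List.mem_range.mp hj
    simp only [Function.comp_apply]
    have he : L1 + L2 - 1 - (L1 + j) = L2 - 1 - j := by omega
    rw [he]
    congr 1
    exact (digit_emod n L2 j hjL).symm

-- B's divide-and-conquer recursion computes exactly A's padded key
theorem padKey_zero : padKey 0 0 = [] := by
  unfold padKey
  rw [numToKeyLoop_stop (by omega)]
  simp

theorem goB_eq_padKey : ∀ (K : Nat) (k n : Int), k.toNat ≤ K → 0 ≤ k → 0 ≤ n →
    n < 52 ^ k.toNat → goB n k = padKey k.toNat n := by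
  intro K
  induction K with
  | zero =>
    intro k n hK hk h0 hn
    have hk0 : k = 0 := by omega
    subst hk0
    simp only [Int.toNat_zero, pow_zero] at hn
    have hn0 : n = 0 := by omega
    subst hn0
    rw [goB]
    simp [padKey_zero]
  | succ K ih =>
    intro k n hK hk h0 hn
    by_cases hk0 : k = 0
    · subst hk0
      simp only [Int.toNat_zero, pow_zero] at hn
      have hn0 : n = 0 := by omega
      subst hn0
      rw [goB]
      simp [padKey_zero]
    by_cases hk1 : k = 1
    · subst hk1
      have hgo : goB n 1 = [PySem.List.pyGetD base52L n 'a'] := by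
        rw [goB]; norm_num
      rw [hgo]
      simp only [Int.toNat_one, pow_one] at hn
      simp only [Int.toNat_one]
      rw [padKey_eq_map 1 n h0 (by simpa using hn)]
      simp only [List.range_one, List.map_cons, List.map_nil, Nat.sub_self, pow_zero]
      rw [Int.ediv_one, Int.emod_eq_of_lt h0 hn]
    · have hk2 : 2 ≤ k := by omega
      have hfd : PySem.Int.floordiv k 2 = k / 2 := PySem.Int.floordiv_eq_ediv_of_pos (by omega)
      rw [goB]
      simp only [dif_neg hk0, dif_neg hk1, dif_neg (by omega : ¬ k < 0)]
      rw [hfd]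
      have hh1 : 1 ≤ k / 2 := by omega
      have hhk : k / 2 < k := by omega
      have hsum : (k - k / 2).toNat + (k / 2).toNat = k.toNat := by omega
      have hp : (0:Int) < 52 ^ (k / 2).toNat := by positivity
      have hfdn : PySem.Int.floordiv n (52 ^ (k / 2).toNat) = n / 52 ^ (k / 2).toNat :=
        PySem.Int.floordiv_eq_ediv_of_pos hp
      have hmn : PySem.Int.mod n (52 ^ (k / 2).toNat) = n % 52 ^ (k / 2).toNat :=
        PySem.Int.mod_eq_emod_of_pos hp
      rw [hfdn, hmn]
      have hn' : n < 52 ^ ((k - k / 2).toNat + (k / 2).toNat) := by rw [hsum]; exact hn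
      have hq0 : 0 ≤ n / 52 ^ (k / 2).toNat := by positivity
      have hqlt : n / 52 ^ (k / 2).toNat < 52 ^ (k - k / 2).toNat := by
        rw [Int.ediv_lt_iff_lt_mul hp]
        calc n < 52 ^ ((k - k / 2).toNat + (k / 2).toNat) := hn'
          _ = 52 ^ (k - k / 2).toNat * 52 ^ (k / 2).toNat := pow_add 52 _ _
      have hr0 : 0 ≤ n % 52 ^ (k / 2).toNat := Int.emod_nonneg n (by positivity)
      have hrlt : n % 52 ^ (k / 2).toNat < 52 ^ (k / 2).toNat := Int.emod_lt_of_pos n hp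
      rw [ih (k - k / 2) _ (by omega) (by omega) hq0 hqlt,
        ih (k / 2) _ (by omega) (by omega) hr0 hrlt,
        ← padKey_split _ _ n h0 hn', hsum]

-- ===== VERDICT =====
theorem num_to_key_spec : Claim_equal_num_to_key := by
  intro num kl hdom hpre
  obtain ⟨h0, hk, hlt⟩ := hpre
  unfold Spec_num_to_key num_to_key num_to_key_alt
  have hguard : ¬ num ≥ 52 ^ kl.toNat := not_le.mpr hlt
  rw [if_neg hguard, if_neg hguard]
  have hlen := numToKeyLoop_len_le kl.toNat num h0 hlt
  have hcond : ((numToKeyLoop num []).length : Int) ≤ kl := by omega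
  simp only [hcond, if_pos]
  rw [goB_eq_padKey kl.toNat kl num le_rfl hk h0 hlt]
  unfold padKey
  have heq : (kl - ((numToKeyLoop num []).length : Int)).toNat
      = kl.toNat - (numToKeyLoop num []).length := by omega
  rw [heq]
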